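-- pv_equiv track=rewrite | github.com/molleer/adventofcode2024 | day21/day21.py | get_small_paths
-- ===== SOURCE A (Python) =====
-- from typing import Dict, List, Tuple
-- from itertools import permutations
--
-- def pass_illegal(pos, path, illegal: List[Tuple[int, int]]) -> bool:
--     if pos in illegal:
--         return True
--     if path == "":
--         return False
--
--     if path[0] == "<":
--         return pass_illegal((pos[0] - 1, pos[1]), path[1:], illegal)
--     if path[0] == ">":
--         return pass_illegal((pos[0] + 1, pos[1]), path[1:], illegal)
--     if path[0] == "v":
--         return pass_illegal((pos[0], pos[1] + 1), path[1:], illegal)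
--     if path[0] == "^":
--         return pass_illegal((pos[0], pos[1] - 1), path[1:], illegal)
--
--     raise ValueError(path[0])
--
-- def get_small_paths(
--     coords: Dict[str, Tuple[int, int]],
--     illegal: List[Tuple[int, int]],
-- ) -> Dict[Tuple[Tuple[int, int], Tuple[int, int]], List[str]]:
--     small_paths = dict()
--     for c1 in coords.values():
--         for c2 in coords.values():
--             path = ""
--             x_diff = c1[0] - c2[0]
--             y_diff = c1[1] - c2[1]
--             if x_diff > 0:
--                 path += "<" * x_diff
--             if x_diff < 0:
--                 path += ">" * (-x_diff)
--             if y_diff > 0: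
--                 path += "^" * y_diff
--             if y_diff < 0:
--                 path += "v" * (-y_diff)
--
--             small_paths[(c1, c2)] = [
--                 "".join(p)
--                 for p in permutations(path)
--                 if not pass_illegal(c1, "".join(p), illegal)
--             ]
--
--     return small_paths
-- ===== SOURCE B (Python) =====
-- from typing import Dict, List, Tuple
-- from itertools import permutations
--
-- DELTA = {"<": (-1, 0), ">": (1, 0), "v": (0, 1), "^": (0, -1)}
--
-- def _legal(start, s, illegal):
--     x, y = start
--     if (x, y) in illegal:
--         return False
--     for ch in s:
--         dx, dy = DELTA[ch]
--         x += dx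
--         y += dy
--         if (x, y) in illegal:
--             return False
--     return True
--
-- def get_small_paths(
--     coords: Dict[str, Tuple[int, int]],
--     illegal: List[Tuple[int, int]],
-- ) -> Dict[Tuple[Tuple[int, int], Tuple[int, int]], List[str]]:
--     small_paths = dict()
--     for c1 in coords.values():
--         for c2 in coords.values():
--             x_diff = c1[0] - c2[0]
--             y_diff = c1[1] - c2[1]
--             path = (
--                 "<" * max(x_diff, 0)
--                 + ">" * max(-x_diff, 0)
--                 + "^" * max(y_diff, 0)
--                 + "v" * max(-y_diff, 0)
--             )
--             small_paths[(c1, c2)] = [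
--                 "".join(p) for p in permutations(path) if _legal(c1, "".join(p), illegal)
--             ]
--     return small_paths
-- ===== Notes on version B (the rewrite author's own statement) =====
-- stated objective: idiomatic
-- what changed: The recursive string-consuming legality checker pass_illegal is replaced by an iterative walk: a delta table maps each move character to an (dx,dy) offset and a single loop advances the position, rejecting as soon as any visited cell (including the start) is illegal; the permutation enumeration and dict construction are unchanged so order and duplicates match exactly.
import Mathlib
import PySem

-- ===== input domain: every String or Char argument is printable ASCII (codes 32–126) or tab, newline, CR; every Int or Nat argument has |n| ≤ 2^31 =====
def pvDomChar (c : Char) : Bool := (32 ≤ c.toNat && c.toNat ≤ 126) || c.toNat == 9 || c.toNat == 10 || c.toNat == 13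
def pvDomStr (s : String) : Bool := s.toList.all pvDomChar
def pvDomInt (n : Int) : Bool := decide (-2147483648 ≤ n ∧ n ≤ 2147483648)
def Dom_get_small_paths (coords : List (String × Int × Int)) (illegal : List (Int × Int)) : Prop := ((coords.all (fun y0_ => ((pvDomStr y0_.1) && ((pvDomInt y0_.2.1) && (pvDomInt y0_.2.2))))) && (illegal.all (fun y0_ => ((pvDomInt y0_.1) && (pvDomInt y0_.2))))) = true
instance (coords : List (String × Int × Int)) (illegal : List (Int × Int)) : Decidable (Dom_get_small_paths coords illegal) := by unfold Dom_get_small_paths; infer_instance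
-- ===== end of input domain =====

-- B replaces the recursive prefix-checker pass_illegal by a single iterative walk driven
-- by a delta table (objective: simpler/idiomatic legality test; same asymptotic cost).

-- ===== PORT A =====
-- pass_illegal, ported over List Char (path[0]/path[1:] of an ASCII string; exact).
-- The final `true` branch is Python's `raise ValueError` — unreachable from get_small_paths,
-- whose candidate strings only contain '<' '>' 'v' '^'.
def passIllegal (pos : Int × Int) (path : List Char) (illegal : List (Int × Int)) : Bool :=
  if decide (pos ∈ illegal) then true
  else
    match path with
    | [] => false
    | c :: rest =>
      if c = '<' then passIllegal (pos.1 - 1, pos.2) rest illegal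
      else if c = '>' then passIllegal (pos.1 + 1, pos.2) rest illegal
      else if c = 'v' then passIllegal (pos.1, pos.2 + 1) rest illegal
      else if c = '^' then passIllegal (pos.1, pos.2 - 1) rest illegal
      else true

-- body of A's inner loop: build the move string, then keep the permutations passing the filter
def aEntry (illegal : List (Int × Int)) (c1 c2 : Int × Int) : List String :=
  let x_diff := c1.1 - c2.1
  let y_diff := c1.2 - c2.2
  let path : List Char := []
  let path := if x_diff > 0 then path ++ List.replicate x_diff.toNat '<' else path
  let path := if x_diff < 0 then path ++ List.replicate (-x_diff).toNat '>' else path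
  let path := if y_diff > 0 then path ++ List.replicate y_diff.toNat '^' else path
  let path := if y_diff < 0 then path ++ List.replicate (-y_diff).toNat 'v' else path
  ((PySem.List.permutations path path.length).filter
      (fun p => !passIllegal c1 p illegal)).map String.ofList

def get_small_paths (coords : List (String × Int × Int)) (illegal : List (Int × Int)) : List ((Int × Int) × (Int × Int) × List String) :=
  let vals := (PySem.Dict.ofList coords).values
  ((vals.foldl (fun d c1 =>
      vals.foldl (fun d c2 => d.insert (c1, c2) (aEntry illegal c1 c2)) d)
    (PySem.Dict.empty : PySem.Dict ((Int × Int) × (Int × Int)) (List String))).items).map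
    (fun kv => (kv.1.1, kv.1.2, kv.2))

-- ===== PORT B =====
-- the DELTA table of Source B; a missing key raises KeyError in Python (unreachable here)
def DELTA : PySem.Dict Char (Int × Int) :=
  PySem.Dict.ofList [('<', (-1, 0)), ('>', (1, 0)), ('v', (0, 1)), ('^', (0, -1))]

-- the for-loop inside _legal
def legalLoop (x y : Int) (s : List Char) (illegal : List (Int × Int)) : Bool :=
  match s with
  | [] => true
  | c :: rest =>
    let d := PySem.Dict.getD DELTA c (0, 0)
    let x := x + d.1
    let y := y + d.2
    if decide ((x, y) ∈ illegal) then false else legalLoop x y rest illegal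

-- _legal: start-cell check, then the iterative walk
def legal (start : Int × Int) (s : List Char) (illegal : List (Int × Int)) : Bool :=
  if decide ((start.1, start.2) ∈ illegal) then false
  else legalLoop start.1 start.2 s illegal

-- body of B's inner loop
def bEntry (illegal : List (Int × Int)) (c1 c2 : Int × Int) : List String :=
  let x_diff := c1.1 - c2.1
  let y_diff := c1.2 - c2.2
  let path := List.replicate (max x_diff 0).toNat '<'
    ++ List.replicate (max (-x_diff) 0).toNat '>'
    ++ List.replicate (max y_diff 0).toNat '^'
    ++ List.replicate (max (-y_diff) 0).toNat 'v'
  ((PySem.List.permutations path path.length).filter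
      (fun p => legal c1 p illegal)).map String.ofList

def get_small_paths_alt (coords : List (String × Int × Int)) (illegal : List (Int × Int)) : List ((Int × Int) × (Int × Int) × List String) :=
  let vals := (PySem.Dict.ofList coords).values
  ((vals.foldl (fun d c1 =>
      vals.foldl (fun d c2 => d.insert (c1, c2) (bEntry illegal c1 c2)) d)
    (PySem.Dict.empty : PySem.Dict ((Int × Int) × (Int × Int)) (List String))).items).map
    (fun kv => (kv.1.1, kv.1.2, kv.2))

-- ===== PRECONDITION & SPEC =====
def Spec_get_small_paths (coords : List (String × Int × Int)) (illegal : List (Int × Int)) (out : List ((Int × Int) × (Int × Int) × List String)) : Prop := out = get_small_paths_alt coords illegal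
instance (coords : List (String × Int × Int)) (illegal : List (Int × Int)) (out : List ((Int × Int) × (Int × Int) × List String)) : Decidable (Spec_get_small_paths coords illegal out) := by unfold Spec_get_small_paths; infer_instance

-- ===== CLAIM (what is proved, stated in full; the proofs are below) =====
def Claim_equal_get_small_paths : Prop := ∀ (coords : List (String × Int × Int)) (illegal : List (Int × Int)), Dom_get_small_paths coords illegal → Spec_get_small_paths coords illegal (get_small_paths coords illegal)

-- ===== LEMMAS AND PROOFS =====

-- conditional append (A's `path += …` guarded by an if) as appending a conditional segment
lemma if_append_eq {c : Prop} [Decidable c] (p r : List Char) :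
    (if c then p ++ r else p) = p ++ (if c then r else []) := by split <;> simp

-- A's positively-guarded segment equals B's max-based segment
lemma seg_pos (x : Int) (ch : Char) :
    (if x > 0 then List.replicate x.toNat ch else []) = List.replicate (max x 0).toNat ch := by
  split
  · congr 1; omega
  · have h : (max x 0).toNat = 0 := by omega
    simp [h]

-- A's negatively-guarded segment equals B's max-based segment
lemma seg_neg (x : Int) (ch : Char) :
    (if x < 0 then List.replicate (-x).toNat ch else []) = List.replicate (max (-x) 0).toNat ch := by
  split
  · congr 1; omega
  · have h : (max (-x) 0).toNat = 0 := by omega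
    simp [h]

-- the recursive prefix check and the iterative walk agree on strings over the move alphabet
lemma pass_eq_legal (illegal : List (Int × Int)) :
    ∀ (s : List Char) (pos : Int × Int),
      (∀ c ∈ s, c = '<' ∨ c = '>' ∨ c = 'v' ∨ c = '^') →
      legal pos s illegal = !passIllegal pos s illegal := by
  intro s
  induction s with
  | nil => intro pos _; simp [legal, legalLoop, passIllegal]
  | cons c rest ih =>
    intro pos h
    have hc := h c (List.mem_cons_self ..)
    have hrest : ∀ c ∈ rest, c = '<' ∨ c = '>' ∨ c = 'v' ∨ c = '^' :=
      fun c hm => h c (List.mem_cons_of_mem _ hm)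
    by_cases hp : pos ∈ illegal
    · simp [legal, passIllegal, hp]
    · rcases hc with hc | hc | hc | hc <;> subst hc
      · have hd : DELTA.getD '<' (0, 0) = (-1, 0) := by decide
        have h1 : legal pos ('<' :: rest) illegal = legal (pos.1 - 1, pos.2) rest illegal := by
          simp [legal, legalLoop, hp, hd, sub_eq_add_neg]
        have h2 : passIllegal pos ('<' :: rest) illegal
            = passIllegal (pos.1 - 1, pos.2) rest illegal := by
          rw [passIllegal]; simp [hp]
        rw [h1, h2, ih _ hrest]
      · have hd : DELTA.getD '>' (0, 0) = (1, 0) := by decide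
        have h1 : legal pos ('>' :: rest) illegal = legal (pos.1 + 1, pos.2) rest illegal := by
          simp [legal, legalLoop, hp, hd]
        have h2 : passIllegal pos ('>' :: rest) illegal
            = passIllegal (pos.1 + 1, pos.2) rest illegal := by
          rw [passIllegal]; simp [hp]
        rw [h1, h2, ih _ hrest]
      · have hd : DELTA.getD 'v' (0, 0) = (0, 1) := by decide
        have h1 : legal pos ('v' :: rest) illegal = legal (pos.1, pos.2 + 1) rest illegal := by
          simp [legal, legalLoop, hp, hd]
        have h2 : passIllegal pos ('v' :: rest) illegal
            = passIllegal (pos.1, pos.2 + 1) rest illegal := by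
          rw [passIllegal]; simp [hp]
        rw [h1, h2, ih _ hrest]
      · have hd : DELTA.getD '^' (0, 0) = (0, -1) := by decide
        have h1 : legal pos ('^' :: rest) illegal = legal (pos.1, pos.2 - 1) rest illegal := by
          simp [legal, legalLoop, hp, hd, sub_eq_add_neg]
        have h2 : passIllegal pos ('^' :: rest) illegal
            = passIllegal (pos.1, pos.2 - 1) rest illegal := by
          rw [passIllegal]; simp [hp]
        rw [h1, h2, ih _ hrest]

-- the two inner-loop bodies produce the same list of path strings
lemma entry_eq (illegal : List (Int × Int)) (c1 c2 : Int × Int) :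
    aEntry illegal c1 c2 = bEntry illegal c1 c2 := by
  unfold aEntry bEntry
  simp only [if_append_eq, List.nil_append, seg_pos, seg_neg]
  set path := List.replicate (max (c1.1 - c2.1) 0).toNat '<'
    ++ List.replicate (max (-(c1.1 - c2.1)) 0).toNat '>'
    ++ List.replicate (max (c1.2 - c2.2) 0).toNat '^'
    ++ List.replicate (max (-(c1.2 - c2.2)) 0).toNat 'v' with hpath
  have halph : ∀ c ∈ path, c = '<' ∨ c = '>' ∨ c = 'v' ∨ c = '^' := by
    intro c hm
    rw [hpath] at hm
    simp only [List.mem_append, List.mem_replicate] at hm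
    tauto
  have hfil : ∀ p ∈ PySem.List.permutations path path.length,
      (!passIllegal c1 p illegal) = legal c1 p illegal := by
    intro p hp
    have hperm := PySem.List.perm_of_mem_permutations hp
    have hmem : ∀ c ∈ p, c = '<' ∨ c = '>' ∨ c = 'v' ∨ c = '^' :=
      fun c hc => halph c (hperm.mem_iff.mp hc)
    rw [pass_eq_legal illegal p c1 hmem]
  rw [List.filter_congr hfil]

-- ===== VERDICT (by name: the statement is the Claim_ definition above) =====
theorem get_small_paths_spec : Claim_equal_get_small_paths := by
  intro coords illegal _
  unfold Spec_get_small_paths get_small_paths get_small_paths_alt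
  have h : aEntry illegal = bEntry illegal := by
    funext c1 c2; exact entry_eq illegal c1 c2
  rw [h]
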